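-- pv_equiv track=rewrite | github.com/harelf3/taucs | hm_2/hw2_212077333.py | semi_perfect_4
-- ===== SOURCE A (Python) =====
-- def divisors(n):
--     newlist = [x for x in range(1,n) if n%x==0 ]
--     return newlist
--
-- def semi_perfect_4(n):
--     # so the bst possible runtime is n choose k
--     dlist = divisors(n)
--     if sum(dlist) == n:
--         if len(dlist)==4:
--             return True
--         else:
--             return False
--     if sum(dlist)<n:
--         return False
--     else:
--         dlistrem = divisors(n)
--         for i1 in dlistrem:
--             for i2 in filter(lambda x: x!=i1, dlistrem):
--                 for i3 in filter(lambda x: x!=i1 and x!=i2, dlistrem):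
--                     for i4 in filter(lambda x: x!=i1 and x!=i2 and x!=i3, dlistrem):
--                         if i1+i2+i3+i4 == n:
--                             return True
--         return False
-- ===== SOURCE B (Python) =====
-- def semi_perfect_4(n):
--     # proper divisors all lie in the first half of the range, so scan only half the range
--     divs = [x for x in range(1, n // 2 + 1) if n % x == 0]
--     s = sum(divs)
--     if s == n:
--         return len(divs) == 4
--     if s < n:
--         return False
--     return pick(divs, 4, n)
--
-- def pick(ds, k, t):
--     # exists a choice of k distinct entries of ds summing to t (indices strictly increasing)
--     if k == 0:
--         return t == 0
--     if t <= 0 or not ds: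
--         return False
--     return pick(ds[1:], k - 1, t - ds[0]) or pick(ds[1:], k, t)
-- ===== Notes on version B (the rewrite author's own statement) =====
-- stated objective: alternative
-- what changed: B enumerates divisors only over the first half of the range (a proper divisor is at most half of n) and replaces A's four nested value-filtered loops over ordered quadruples by a single pruned choose-four-of-the-remaining-divisors recursion over the divisor list.
import Mathlib
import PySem

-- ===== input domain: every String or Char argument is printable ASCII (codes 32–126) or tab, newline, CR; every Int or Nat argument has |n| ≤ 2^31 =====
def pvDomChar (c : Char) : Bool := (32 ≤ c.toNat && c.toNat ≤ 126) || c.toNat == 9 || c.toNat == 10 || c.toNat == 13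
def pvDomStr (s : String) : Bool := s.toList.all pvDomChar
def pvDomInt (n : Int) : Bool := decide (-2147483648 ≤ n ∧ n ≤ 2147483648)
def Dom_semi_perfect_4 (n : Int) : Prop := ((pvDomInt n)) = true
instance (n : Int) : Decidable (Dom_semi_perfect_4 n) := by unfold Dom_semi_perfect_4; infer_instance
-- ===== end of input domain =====

-- B scans only [1, n//2] for divisors and replaces A's 4 nested filtered loops by a
-- pruned "choose 4 of the remaining divisors" recursion; objective: alternative/faster search.

-- ===== PORT A =====
-- helper 'divisors' of A
def divisors (n : Int) : List Int :=
  (PySem.List.pyRange 1 n 1).filter (fun x => PySem.Int.mod n x == 0)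

-- the quadruple nested for-loops of A (return True on hit, False after the loops)
def searchA (dlistrem : List Int) (n : Int) : Bool :=
  dlistrem.any fun i1 =>
    (dlistrem.filter (fun x => x != i1)).any fun i2 =>
      (dlistrem.filter (fun x => x != i1 && x != i2)).any fun i3 =>
        (dlistrem.filter (fun x => x != i1 && x != i2 && x != i3)).any fun i4 =>
          i1 + i2 + i3 + i4 == n

def semi_perfect_4 (n : Int) : Bool :=
  let dlist := divisors n
  if dlist.sum == n then
    (if dlist.length == 4 then true else false)
  else if dlist.sum < n then false
  else searchA (divisors n) n

-- ===== PORT B =====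
def divisorsB (n : Int) : List Int :=
  (PySem.List.pyRange 1 (PySem.Int.floordiv n 2 + 1) 1).filter (fun x => PySem.Int.mod n x == 0)

-- helper 'pick' of B: k distinct entries of ds (indices increasing) summing to t?
def pick : List Int → Nat → Int → Bool
  | _, 0, t => t == 0
  | [], _ + 1, _ => false
  | d :: ds, k + 1, t => if t ≤ 0 then false else (pick ds k (t - d) || pick ds (k + 1) t)

def semi_perfect_4_alt (n : Int) : Bool :=
  let divs := divisorsB n
  if divs.sum == n then divs.length == 4
  else if divs.sum < n then false
  else pick divs 4 n

-- ===== PRECONDITION & SPEC =====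
def Spec_semi_perfect_4 (n : Int) (out : Bool) : Prop := out = semi_perfect_4_alt n
instance (n : Int) (out : Bool) : Decidable (Spec_semi_perfect_4 n out) := by unfold Spec_semi_perfect_4; infer_instance

-- ===== CLAIM (what is proved, stated in full; the proofs are below) =====
def Claim_equal_semi_perfect_4 : Prop := ∀ (n : Int), Dom_semi_perfect_4 n → Spec_semi_perfect_4 n (semi_perfect_4 n)

-- ===== LEMMAS AND PROOFS =====

-- a proper divisor of n is at most n//2, so the two scans find the same list
lemma divisors_eq (n : Int) : divisors n = divisorsB n := by
  unfold divisors divisorsB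
  by_cases hn : n ≤ 1
  · rw [PySem.List.pyRange_one_eq_nil hn, PySem.List.pyRange_one_eq_nil (by
      rw [PySem.Int.floordiv_eq_ediv_of_pos (by norm_num)]; omega)]
  · push Not at hn
    rw [PySem.Int.floordiv_eq_ediv_of_pos (by norm_num)]
    rw [PySem.List.pyRange_one_append 1 (n / 2 + 1) n (by omega) (by omega),
        List.filter_append]
    have hnil : ((PySem.List.pyRange (n / 2 + 1) n 1).filter
        (fun x => PySem.Int.mod n x == 0)) = [] := by
      rw [List.filter_eq_nil_iff]
      intro x hx
      rw [PySem.List.mem_pyRange_one] at hx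
      simp only [beq_iff_eq]
      intro hmod
      have hxpos : 0 < x := by omega
      have hdvd : x ∣ n := by
        have := (PySem.Int.mod_eq_zero_iff_dvd n x).mp hmod
        exact this
      obtain ⟨q, hq⟩ := hdvd
      rcases lt_trichotomy q 1 with h1 | h1 | h1
      · have hq0 : q ≤ 0 := by omega
        have : x * q ≤ 0 := mul_nonpos_of_nonneg_of_nonpos (by omega) hq0
        omega
      · subst h1
        omega
      · have h2q : 2 ≤ q := by omega
        have hxx : x * 2 ≤ x * q := mul_le_mul_of_nonneg_left h2q (le_of_lt hxpos)
        have hx2 : n + 1 ≤ 2 * x := by omega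
        have hn2 : x * 2 ≤ n := by rw [hq]; exact hxx
        linarith
    rw [hnil, List.append_nil]

lemma divisors_nodup (n : Int) : (divisors n).Nodup :=
  (PySem.List.nodup_pyRange_one 1 n).filter _

lemma divisors_pos (n : Int) : ∀ x ∈ divisors n, 0 < x := by
  intro x hx
  have := (List.mem_filter.mp hx).1
  rw [PySem.List.mem_pyRange_one] at this
  omega

-- B's recursion decides "some length-k sublist sums to t" (entries positive)
lemma pick_iff (L : List Int) (k : Nat) (t : Int) (hpos : ∀ x ∈ L, 0 < x) :
    pick L k t = true ↔ ∃ s : List Int, s.Sublist L ∧ s.length = k ∧ s.sum = t := by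
  induction L generalizing k t with
  | nil =>
    cases k with
    | zero =>
      rw [show pick [] 0 t = (t == 0) from rfl]
      simp only [beq_iff_eq, List.sublist_nil]
      constructor
      · rintro rfl; exact ⟨[], rfl, rfl, rfl⟩
      · rintro ⟨s, rfl, _, hsum⟩; simpa using hsum.symm
    | succ k =>
      rw [show pick [] (k + 1) t = false from rfl]
      simp only [Bool.false_eq_true, false_iff]
      rintro ⟨s, hs, hlen, -⟩
      rw [List.sublist_nil] at hs
      subst hs
      simp at hlen
  | cons d ds ih =>
    cases k with
    | zero =>
      rw [show pick (d :: ds) 0 t = (t == 0) from rfl]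
      simp only [beq_iff_eq]
      constructor
      · rintro rfl; exact ⟨[], List.nil_sublist _, rfl, rfl⟩
      · rintro ⟨s, _, hlen, hsum⟩
        rw [List.length_eq_zero_iff] at hlen
        subst hlen; simpa using hsum.symm
    | succ k =>
      have hpos' : ∀ x ∈ ds, 0 < x := fun x hx => hpos x (List.mem_cons_of_mem _ hx)
      by_cases ht : t ≤ 0
      · rw [show pick (d :: ds) (k + 1) t
            = if t ≤ 0 then false else (pick ds k (t - d) || pick ds (k + 1) t) from rfl,
          if_pos ht]
        constructor
        · intro h; exact absurd h (by simp)
        · rintro ⟨s, hs, hlen, hsum⟩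
          have hne : s ≠ [] := by intro h; subst h; simp at hlen
          have : 0 < s.sum := List.sum_pos s (fun x hx => hpos x (hs.subset hx)) hne
          omega
      · rw [show pick (d :: ds) (k + 1) t
            = if t ≤ 0 then false else (pick ds k (t - d) || pick ds (k + 1) t) from rfl,
          if_neg ht]
        simp only [Bool.or_eq_true, ih _ _ hpos']
        constructor
        · rintro (⟨s, hs, hlen, hsum⟩ | ⟨s, hs, hlen, hsum⟩)
          · exact ⟨d :: s, hs.cons₂ d, by simp [hlen], by simp [hsum]⟩
          · exact ⟨s, hs.cons d, hlen, hsum⟩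
        · rintro ⟨s, hs, hlen, hsum⟩
          cases hs with
          | cons _ h => exact Or.inr ⟨s, h, hlen, hsum⟩
          | cons₂ _ h =>
            rename_i s'
            refine Or.inl ⟨s', h, by simpa using hlen, ?_⟩
            simp at hsum; omega

-- the predicate A's nested loops decide
def Quad (L : List Int) (n : Int) : Prop :=
  ∃ a b c d : Int, a ∈ L ∧ b ∈ L ∧ c ∈ L ∧ d ∈ L ∧
    a ≠ b ∧ a ≠ c ∧ a ≠ d ∧ b ≠ c ∧ b ≠ d ∧ c ≠ d ∧ a + b + c + d = n

lemma searchA_iff (L : List Int) (n : Int) : searchA L n = true ↔ Quad L n := by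
  unfold searchA Quad
  simp only [List.any_eq_true, List.mem_filter, Bool.and_eq_true, bne_iff_ne, beq_iff_eq,
    and_assoc]
  constructor
  · rintro ⟨a, ha, b, hb, hba, c, hc, hca, hcb, d, hd, hda, hdb, hdc, hsum⟩
    exact ⟨a, b, c, d, ha, hb, hc, hd, hba.symm, hca.symm, hda.symm, hcb.symm,
      hdb.symm, hdc.symm, hsum⟩
  · rintro ⟨a, b, c, d, ha, hb, hc, hd, hab, hac, had, hbc, hbd, hcd, hsum⟩
    exact ⟨a, ha, b, hb, hab.symm, c, hc, hac.symm, hbc.symm,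
      d, hd, had.symm, hbd.symm, hcd.symm, hsum⟩

lemma quad_iff_sublist (L : List Int) (n : Int) (hnd : L.Nodup) :
    Quad L n ↔ ∃ s : List Int, s.Sublist L ∧ s.length = 4 ∧ s.sum = n := by
  constructor
  · rintro ⟨a, b, c, d, ha, hb, hc, hd, hab, hac, had, hbc, hbd, hcd, hsum⟩
    set M := L.filter (fun x => x == a || x == b || x == c || x == d) with hM
    have hsub : M.Sublist L := List.filter_sublist
    have hMnd : M.Nodup := hnd.filter _
    have habcd : ([a, b, c, d] : List Int).Nodup := by
      simp [hab, hac, had, hbc, hbd, hcd]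
    have hmem : ∀ x, x ∈ M ↔ x ∈ ([a, b, c, d] : List Int) := by
      intro x
      simp only [hM, List.mem_filter, Bool.or_eq_true, beq_iff_eq,
        List.mem_cons, List.not_mem_nil, or_false, or_assoc]
      constructor
      · exact fun h => h.2
      · intro h
        refine ⟨?_, h⟩
        rcases h with rfl | rfl | rfl | rfl <;> assumption
    have hperm : M.Perm [a, b, c, d] :=
      (List.perm_ext_iff_of_nodup hMnd habcd).mpr hmem
    refine ⟨M, hsub, by simpa using hperm.length_eq, ?_⟩
    rw [hperm.sum_eq]; simp; omega
  · rintro ⟨s, hs, hlen, hsum⟩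
    obtain ⟨a, b, c, d, rfl⟩ : ∃ a b c d : Int, s = [a, b, c, d] := by
      rcases s with _ | ⟨a, _ | ⟨b, _ | ⟨c, _ | ⟨d, _ | ⟨e, rest⟩⟩⟩⟩⟩ <;>
        first
        | exact ⟨_, _, _, _, rfl⟩
        | simp_all
    have hsnd : ([a, b, c, d] : List Int).Nodup := hs.nodup hnd
    have hmem := hs.subset
    simp only [List.nodup_cons, List.mem_cons,
      List.not_mem_nil, List.nodup_nil, and_true, or_false] at hsnd
    obtain ⟨ha', hb', hc'⟩ := hsnd
    push Not at ha' hb'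
    simp only [List.sum_cons, List.sum_nil] at hsum
    exact ⟨a, b, c, d, hmem (by simp), hmem (by simp), hmem (by simp), hmem (by simp),
      ha'.1, ha'.2.1, ha'.2.2, hb'.1, hb'.2, hc'.1, by omega⟩

lemma search_eq_pick (n : Int) : searchA (divisors n) n = pick (divisors n) 4 n := by
  rw [Bool.eq_iff_iff, searchA_iff, quad_iff_sublist _ _ (divisors_nodup n),
    pick_iff _ _ _ (divisors_pos n)]

-- ===== VERDICT (by name: the statement is the Claim_ definition above) =====
theorem semi_perfect_4_spec : Claim_equal_semi_perfect_4 := by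
  intro n _
  unfold Spec_semi_perfect_4 semi_perfect_4 semi_perfect_4_alt
  rw [← divisors_eq]
  simp only []
  by_cases h1 : (divisors n).sum == n
  · simp only [h1, if_pos]
    rw [Bool.eq_iff_iff]
    simp
  · by_cases h2 : (divisors n).sum < n
    · simp [h1, h2]
    · simp [h1, h2, search_eq_pick]
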